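-- pv_equiv track=rewrite | github.com/synaptent/RingRift | ai-service/app/rules/default_engine.py | _diff_mapping_keys
-- ===== SOURCE A (Python) =====
-- from typing import List, Mapping
--
-- def _diff_mapping_keys(
--     mut: Mapping[str, object],
--     eng: Mapping[str, object],
--     max_keys: int = 5,
-- ) -> str:
--     """Return a compact summary of key differences between two mappings.
--
--     The result is designed for error messages and focuses on which keys
--     differ, not full value dumps. It reports:
--
--     - Keys only present in ``mut`` (``only_mut``)
--     - Keys only present in ``eng`` (``only_eng``)
--     - Keys present in both where the values differ (``changed``)
--
--     Each bucket is truncated to ``max_keys`` entries with a ``(+ more)``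
--     suffix when additional keys exist.
--     """
--     mut_keys = set(mut.keys())
--     eng_keys = set(eng.keys())
--
--     only_mut_keys = sorted(mut_keys - eng_keys)
--     only_eng_keys = sorted(eng_keys - mut_keys)
--     changed_keys = sorted(
--         key for key in mut_keys & eng_keys if mut.get(key) != eng.get(key)
--     )
--
--     def _fmt(keys: list[str]) -> str:
--         display = list(keys)
--         extra = ""
--         if len(display) > max_keys:
--             display = display[:max_keys]
--             extra = ", (+ more)"
--         inner = ", ".join(repr(k) for k in display)
--         return f"[{inner}{extra}]"
--
--     parts: list[str] = []
--     if only_mut_keys: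
--         parts.append(f"only_mut={_fmt(only_mut_keys)}")
--     if only_eng_keys:
--         parts.append(f"only_eng={_fmt(only_eng_keys)}")
--     if changed_keys:
--         parts.append(f"changed={_fmt(changed_keys)}")
--
--     return ", ".join(parts) if parts else "no_diff"
-- ===== SOURCE B (Python) =====
-- def _diff_mapping_keys(mut, eng, max_keys=5):
--     """Sort each mapping's keys once, then classify with a single two-pointer
--     merge of the two sorted key lists (buckets come out already sorted),
--     instead of three set-algebra computations with per-bucket sorts."""
--     ms = sorted(mut.keys())
--     es = sorted(eng.keys())
--     only_mut = []
--     only_eng = []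
--     changed = []
--     i = j = 0
--     while i < len(ms) and j < len(es):
--         a, b = ms[i], es[j]
--         if a == b:
--             if mut[a] != eng[b]:
--                 changed.append(a)
--             i += 1
--             j += 1
--         elif a < b:
--             only_mut.append(a)
--             i += 1
--         else:
--             only_eng.append(b)
--             j += 1
--     only_mut.extend(ms[i:])
--     only_eng.extend(es[j:])
--
--     def _fmt(keys):
--         display = list(keys)
--         extra = ""
--         if len(display) > max_keys:
--             display = display[:max_keys]
--             extra = ", (+ more)"
--         inner = ", ".join(repr(k) for k in display)
--         return f"[{inner}{extra}]"
--
--     parts = []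
--     if only_mut:
--         parts.append(f"only_mut={_fmt(only_mut)}")
--     if only_eng:
--         parts.append(f"only_eng={_fmt(only_eng)}")
--     if changed:
--         parts.append(f"changed={_fmt(changed)}")
--     return ", ".join(parts) if parts else "no_diff"
-- ===== Notes on version B (the rewrite author's own statement) =====
-- stated objective: alternative
-- what changed: Instead of A's three set-algebra bucket computations each followed by its own sort, B sorts the two key lists once and classifies with a single two-pointer merge of the sorted lists, so the three buckets are produced already in sorted order; the formatting helper is unchanged.
import Mathlib
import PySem

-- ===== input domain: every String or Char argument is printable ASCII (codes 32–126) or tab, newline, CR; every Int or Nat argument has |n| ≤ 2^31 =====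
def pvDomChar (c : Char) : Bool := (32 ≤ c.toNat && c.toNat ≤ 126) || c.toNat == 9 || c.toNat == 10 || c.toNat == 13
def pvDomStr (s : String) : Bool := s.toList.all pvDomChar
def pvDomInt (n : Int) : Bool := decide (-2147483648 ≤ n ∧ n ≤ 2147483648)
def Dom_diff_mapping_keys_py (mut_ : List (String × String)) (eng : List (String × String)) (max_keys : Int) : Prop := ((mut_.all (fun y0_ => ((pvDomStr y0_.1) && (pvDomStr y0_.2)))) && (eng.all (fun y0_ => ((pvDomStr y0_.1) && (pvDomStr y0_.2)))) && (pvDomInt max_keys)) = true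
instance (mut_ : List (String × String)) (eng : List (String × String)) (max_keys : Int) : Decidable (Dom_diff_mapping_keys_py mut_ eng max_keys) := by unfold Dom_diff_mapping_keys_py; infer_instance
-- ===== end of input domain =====

-- B replaces A's three set-algebra bucket computations (each followed by its own sort) by
-- sorting the two key lists once and classifying with a single two-pointer merge, so the
-- buckets come out already sorted (objective: alternative decomposition; formatting identical).
-- Both ports read each Mapping argument as the Python dict its pair list builds
-- (PySem.Dict.ofList: later duplicates overwrite, first position kept — dict(pairs)).

-- ===== PORT A =====
-- shared port of the Python builtin repr(k) for str (exact on the Dom alphabet: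
-- printable ASCII, tab, newline, CR): quote choice and the escapes \\ \' \t \n \r
def pyReprChar (q : Char) (c : Char) : List Char :=
  if c = '\\' then ['\\', '\\']
  else if c = q then ['\\', q]
  else if c = '\t' then ['\\', 't']
  else if c = '\n' then ['\\', 'n']
  else if c = '\r' then ['\\', 'r']
  else [c]

def pyReprStr (s : String) : String :=
  let cs := s.toList
  let q : Char := if cs.contains '\'' && !cs.contains '"' then '"' else '\''
  String.ofList (q :: cs.flatMap (pyReprChar q) ++ [q])

-- the nested helper _fmt, identical in A and B
def pvFmt (max_keys : Int) (keys : List String) : String :=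
  let display := keys
  let (display, extra) :=
    if (display.length : Int) > max_keys
      then (PySem.List.slice display none (some max_keys), ", (+ more)")
      else (display, "")
  let inner := PySem.Str.join ", " (display.map pyReprStr)
  "[" ++ inner ++ extra ++ "]"

def diff_mapping_keys_py (mut_ : List (String × String)) (eng : List (String × String)) (max_keys : Int) : String :=
  let mutM := PySem.Dict.ofList mut_
  let engM := PySem.Dict.ofList eng
  let mut_keys : PySem.Set String := PySem.Set.ofList mutM.keys
  let eng_keys : PySem.Set String := PySem.Set.ofList engM.keys
  let only_mut_keys := PySem.List.sorted (PySem.Set.diff mut_keys eng_keys) (fun k => k) false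
  let only_eng_keys := PySem.List.sorted (PySem.Set.diff eng_keys mut_keys) (fun k => k) false
  let changed_keys := PySem.List.sorted
    ((PySem.Set.inter mut_keys eng_keys).filter (fun k => mutM.get? k != engM.get? k)) (fun k => k) false
  let parts : List String := []
  let parts := if only_mut_keys.isEmpty then parts else parts ++ ["only_mut=" ++ pvFmt max_keys only_mut_keys]
  let parts := if only_eng_keys.isEmpty then parts else parts ++ ["only_eng=" ++ pvFmt max_keys only_eng_keys]
  let parts := if changed_keys.isEmpty then parts else parts ++ ["changed=" ++ pvFmt max_keys changed_keys]
  if parts.isEmpty then "no_diff" else PySem.Str.join ", " parts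

-- ===== PORT B =====
-- B's while-loop with two indices i, j over the sorted key lists, transcribed as the
-- obvious recursion on the two suffixes ms[i:], es[j:]; the trailing extends are the
-- two base cases. Appending then recursing = consing onto the recursive result.
def pvMerge (md ed : PySem.Dict String String) : List String → List String → List String × List String × List String
  | [], es => ([], es, [])
  | m :: ms, [] => (m :: ms, [], [])
  | m :: ms, e :: es =>
    if m == e then
      let r := pvMerge md ed ms es
      (r.1, r.2.1, if md.get? m != ed.get? e then m :: r.2.2 else r.2.2)
    else if m < e then
      let r := pvMerge md ed ms (e :: es)
      (m :: r.1, r.2.1, r.2.2)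
    else
      let r := pvMerge md ed (m :: ms) es
      (r.1, e :: r.2.1, r.2.2)
termination_by ms es => ms.length + es.length

def diff_mapping_keys_py_alt (mut_ : List (String × String)) (eng : List (String × String)) (max_keys : Int) : String :=
  let mutM := PySem.Dict.ofList mut_
  let engM := PySem.Dict.ofList eng
  let ms := PySem.List.sorted mutM.keys (fun k => k) false
  let es := PySem.List.sorted engM.keys (fun k => k) false
  let r := pvMerge mutM engM ms es
  let only_mut := r.1
  let only_eng := r.2.1
  let changed := r.2.2
  let parts : List String := []
  let parts := if only_mut.isEmpty then parts else parts ++ ["only_mut=" ++ pvFmt max_keys only_mut]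
  let parts := if only_eng.isEmpty then parts else parts ++ ["only_eng=" ++ pvFmt max_keys only_eng]
  let parts := if changed.isEmpty then parts else parts ++ ["changed=" ++ pvFmt max_keys changed]
  if parts.isEmpty then "no_diff" else PySem.Str.join ", " parts

-- ===== PRECONDITION & SPEC =====
def Spec_diff_mapping_keys_py (mut_ : List (String × String)) (eng : List (String × String)) (max_keys : Int) (out : String) : Prop := out = diff_mapping_keys_py_alt mut_ eng max_keys
instance (mut_ : List (String × String)) (eng : List (String × String)) (max_keys : Int) (out : String) : Decidable (Spec_diff_mapping_keys_py mut_ eng max_keys out) := by unfold Spec_diff_mapping_keys_py; infer_instance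

-- ===== CLAIM (what is proved, stated in full; the proofs are below) =====
def Claim_equal_diff_mapping_keys_py : Prop := ∀ (mut_ : List (String × String)) (eng : List (String × String)) (max_keys : Int), Dom_diff_mapping_keys_py mut_ eng max_keys → Spec_diff_mapping_keys_py mut_ eng max_keys (diff_mapping_keys_py mut_ eng max_keys)

-- ===== LEMMAS AND PROOFS =====

theorem contains_cons_of_ne {x y : String} (l : List String) (h : x ≠ y) :
    (y :: l).contains x = l.contains x := by
  simp [h]

theorem contains_eq_false_of_not_mem {x : String} {l : List String} (h : x ∉ l) :
    l.contains x = false := by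
  rw [Bool.eq_false_iff]; simpa [List.contains_iff_mem] using h

-- the two-pointer merge on strictly increasing lists computes the three filter buckets
theorem pvMerge_eq (md ed : PySem.Dict String String) :
    ∀ (ms es : List String), ms.Pairwise (· < ·) → es.Pairwise (· < ·) →
    pvMerge md ed ms es =
      (ms.filter (fun a => !es.contains a),
       es.filter (fun b => !ms.contains b),
       ms.filter (fun a => es.contains a && (md.get? a != ed.get? a))) := by
  intro ms
  induction ms with
  | nil => intro es _ _; simp [pvMerge]
  | cons m ms ihm =>
    intro es
    induction es with
    | nil => intro _ _; simp [pvMerge]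
    | cons e es ihe =>
      intro hm he
      obtain ⟨hm1, hm2⟩ := List.pairwise_cons.mp hm
      obtain ⟨he1, he2⟩ := List.pairwise_cons.mp he
      rw [pvMerge]
      by_cases hme : m = e
      · subst hme
        simp only [beq_self_eq_true, if_true]
        rw [ihm es hm2 he2]
        dsimp only
        refine Prod.ext ?_ (Prod.ext ?_ ?_)
        · dsimp only
          rw [List.filter_cons_of_neg (by simp)]
          exact (List.filter_congr
            (fun a ha => by rw [contains_cons_of_ne es (ne_of_gt (hm1 a ha))])).symm
        · dsimp only
          rw [List.filter_cons_of_neg (by simp)]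
          exact (List.filter_congr
            (fun b hb => by rw [contains_cons_of_ne ms (ne_of_gt (he1 b hb))])).symm
        · dsimp only
          have ht : List.filter (fun a => (m :: es).contains a && (md.get? a != ed.get? a)) ms
              = List.filter (fun a => es.contains a && (md.get? a != ed.get? a)) ms :=
            List.filter_congr (fun a ha => by rw [contains_cons_of_ne es (ne_of_gt (hm1 a ha))])
          rw [List.filter_cons, ht]
          simp only [List.contains_cons, beq_self_eq_true, Bool.true_or, Bool.true_and]
      · have hbeq : (m == e) = false := by simp [hme]
        rw [if_neg (by simp [hme])]
        by_cases hlt : m < e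
        · rw [if_pos hlt, ihm (e :: es) hm2 he]
          dsimp only
          have hnm : m ∉ e :: es := by
            intro h
            rcases List.mem_cons.mp h with h | h
            · exact hme h
            · exact absurd (lt_trans hlt (he1 m h)) (lt_irrefl m)
          have hcf : ((e :: es).contains m) = false := contains_eq_false_of_not_mem hnm
          refine Prod.ext ?_ (Prod.ext ?_ ?_)
          · dsimp only
            rw [List.filter_cons_of_pos (by rw [hcf]; rfl)]
          · dsimp only
            refine (List.filter_congr (fun b hb => ?_)).symm
            have hbm : b ≠ m := by
              rcases List.mem_cons.mp hb with h | h
              · exact fun h' => hme (h'.symm.trans h)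
              · exact ne_of_gt (lt_trans hlt (he1 b h))
            rw [contains_cons_of_ne ms hbm]
          · dsimp only
            rw [List.filter_cons_of_neg (by rw [hcf]; simp)]
        · have hgt : e < m := lt_of_le_of_ne (not_lt.mp hlt) (fun h => hme h.symm)
          rw [if_neg hlt, ihe hm he2]
          dsimp only
          have hne : e ∉ m :: ms := by
            intro h
            rcases List.mem_cons.mp h with h | h
            · exact hme h.symm
            · exact absurd (lt_trans hgt (hm1 e h)) (lt_irrefl e)
          have hcf : ((m :: ms).contains e) = false := contains_eq_false_of_not_mem hne
          have hmcontains : ∀ a ∈ m :: ms, ((e :: es).contains a) = es.contains a := by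
            intro a ha
            have : a ≠ e := by
              rcases List.mem_cons.mp ha with h | h
              · exact h ▸ hme
              · exact ne_of_gt (lt_trans hgt (hm1 a h))
            exact contains_cons_of_ne es this
          refine Prod.ext ?_ (Prod.ext ?_ ?_)
          · dsimp only
            exact (List.filter_congr (fun a ha => by rw [hmcontains a ha])).symm
          · dsimp only
            rw [List.filter_cons_of_pos (by rw [hcf]; rfl)]
          · dsimp only
            exact (List.filter_congr (fun a ha => by rw [hmcontains a ha])).symm

-- sorting commutes with filtering (identity key)
theorem sorted_filter_comm (l : List String) (p : String → Bool) :
    PySem.List.sorted (l.filter p) (fun x => x) false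
      = (PySem.List.sorted l (fun x => x) false).filter p :=
  PySem.List.sorted_id_eq_of_perm_of_pairwise _ _
    ((PySem.List.sorted_perm l _ false).filter p)
    ((PySem.List.sorted_pairwise l _).filter p)

-- Set.contains over set(d.keys) agrees with membership in sorted(d.keys)
theorem contains_sorted_bridge (ed : PySem.Dict String String) (k : String) :
    (PySem.Set.ofList ed.keys).contains k
      = (PySem.List.sorted ed.keys (fun x => x) false).contains k := by
  rw [Bool.eq_iff_iff]
  simp only [PySem.Set.contains, List.contains_iff_mem, PySem.Set.mem_ofList,
    PySem.List.mem_sorted]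

theorem sorted_keys_pairwise_lt (ps : List (String × String)) :
    (PySem.List.sorted (PySem.Dict.ofList ps).keys (fun x => x) false).Pairwise (· < ·) := by
  have := PySem.List.sorted_ofList_pairwise_lt (PySem.Dict.ofList ps).keys
  rwa [PySem.Set.ofList_eq_self_of_nodup _ (PySem.Dict.nodup_keys_ofList ps)] at this

-- A's three sorted set-algebra buckets, re-expressed as filters over the sorted key lists
theorem bucket_only_mut (mut_ eng : List (String × String)) :
    PySem.List.sorted (PySem.Set.diff (PySem.Set.ofList (PySem.Dict.ofList mut_).keys)
        (PySem.Set.ofList (PySem.Dict.ofList eng).keys)) (fun k => k) false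
      = (PySem.List.sorted (PySem.Dict.ofList mut_).keys (fun k => k) false).filter
          (fun a => !(PySem.List.sorted (PySem.Dict.ofList eng).keys (fun k => k) false).contains a) := by
  rw [PySem.Set.ofList_eq_self_of_nodup _ (PySem.Dict.nodup_keys_ofList mut_)]
  show PySem.List.sorted ((PySem.Dict.ofList mut_).keys.filter
    (fun x => !(PySem.Set.ofList (PySem.Dict.ofList eng).keys).contains x)) (fun k => k) false = _
  rw [sorted_filter_comm]
  exact List.filter_congr (fun a _ => by rw [contains_sorted_bridge])

theorem bucket_only_eng (mut_ eng : List (String × String)) :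
    PySem.List.sorted (PySem.Set.diff (PySem.Set.ofList (PySem.Dict.ofList eng).keys)
        (PySem.Set.ofList (PySem.Dict.ofList mut_).keys)) (fun k => k) false
      = (PySem.List.sorted (PySem.Dict.ofList eng).keys (fun k => k) false).filter
          (fun b => !(PySem.List.sorted (PySem.Dict.ofList mut_).keys (fun k => k) false).contains b) := by
  rw [PySem.Set.ofList_eq_self_of_nodup _ (PySem.Dict.nodup_keys_ofList eng)]
  show PySem.List.sorted ((PySem.Dict.ofList eng).keys.filter
    (fun x => !(PySem.Set.ofList (PySem.Dict.ofList mut_).keys).contains x)) (fun k => k) false = _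
  rw [sorted_filter_comm]
  exact List.filter_congr (fun b _ => by rw [contains_sorted_bridge])

theorem bucket_changed (mut_ eng : List (String × String)) :
    PySem.List.sorted
        ((PySem.Set.inter (PySem.Set.ofList (PySem.Dict.ofList mut_).keys)
            (PySem.Set.ofList (PySem.Dict.ofList eng).keys)).filter
          (fun k => (PySem.Dict.ofList mut_).get? k != (PySem.Dict.ofList eng).get? k)) (fun k => k) false
      = (PySem.List.sorted (PySem.Dict.ofList mut_).keys (fun k => k) false).filter
          (fun a => (PySem.List.sorted (PySem.Dict.ofList eng).keys (fun k => k) false).contains a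
            && ((PySem.Dict.ofList mut_).get? a != (PySem.Dict.ofList eng).get? a)) := by
  rw [PySem.Set.ofList_eq_self_of_nodup _ (PySem.Dict.nodup_keys_ofList mut_)]
  show PySem.List.sorted (((PySem.Dict.ofList mut_).keys.filter
    (fun x => (PySem.Set.ofList (PySem.Dict.ofList eng).keys).contains x)).filter
    (fun k => (PySem.Dict.ofList mut_).get? k != (PySem.Dict.ofList eng).get? k)) (fun k => k) false = _
  rw [List.filter_filter, sorted_filter_comm]
  exact List.filter_congr (fun a _ => by rw [contains_sorted_bridge, Bool.and_comm])

-- ===== VERDICT (by name: the statement is the Claim_ definition above) =====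
theorem diff_mapping_keys_py_spec : Claim_equal_diff_mapping_keys_py := by
  intro mut_ eng max_keys _
  show diff_mapping_keys_py mut_ eng max_keys = diff_mapping_keys_py_alt mut_ eng max_keys
  have htriple :
      (PySem.List.sorted (PySem.Set.diff (PySem.Set.ofList (PySem.Dict.ofList mut_).keys)
          (PySem.Set.ofList (PySem.Dict.ofList eng).keys)) (fun k => k) false,
       PySem.List.sorted (PySem.Set.diff (PySem.Set.ofList (PySem.Dict.ofList eng).keys)
          (PySem.Set.ofList (PySem.Dict.ofList mut_).keys)) (fun k => k) false,
       PySem.List.sorted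
        ((PySem.Set.inter (PySem.Set.ofList (PySem.Dict.ofList mut_).keys)
            (PySem.Set.ofList (PySem.Dict.ofList eng).keys)).filter
          (fun k => (PySem.Dict.ofList mut_).get? k != (PySem.Dict.ofList eng).get? k)) (fun k => k) false)
      = pvMerge (PySem.Dict.ofList mut_) (PySem.Dict.ofList eng)
          (PySem.List.sorted (PySem.Dict.ofList mut_).keys (fun k => k) false)
          (PySem.List.sorted (PySem.Dict.ofList eng).keys (fun k => k) false) := by
    rw [pvMerge_eq _ _ _ _ (sorted_keys_pairwise_lt mut_) (sorted_keys_pairwise_lt eng)]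
    exact Prod.ext (bucket_only_mut mut_ eng) (Prod.ext (bucket_only_eng mut_ eng) (bucket_changed mut_ eng))
  exact congrArg (fun r : List String × List String × List String =>
    let parts : List String := []
    let parts := if r.1.isEmpty then parts else parts ++ ["only_mut=" ++ pvFmt max_keys r.1]
    let parts := if r.2.1.isEmpty then parts else parts ++ ["only_eng=" ++ pvFmt max_keys r.2.1]
    let parts := if r.2.2.isEmpty then parts else parts ++ ["changed=" ++ pvFmt max_keys r.2.2]
    if parts.isEmpty then "no_diff" else PySem.Str.join ", " parts) htriple
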